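-- pv_equiv track=rewrite | github.com/skalaydzhiyski/competitive-programming | cf/contest/1791/d/d.py | solve
-- ===== SOURCE A (Python) =====
-- def solve(input_string):
--     seen = set()
--     rep = {}
--     count = 0
--     res = 0
--     for idx, c in enumerate(input_string):
--         if c in seen:
--             current = count + len(set(input_string[idx:]))
--             if current > res:
--                 res = current
--             count = 0
--         count += 1
--         seen.add(c)
--     return res
-- ===== SOURCE B (Python) =====
-- def solve(input_string):
--     # One backward pass precomputes the distinct-character count of every
--     # suffix, so the forward pass needs no inner scan.
--     n = len(input_string)
--     suf = [0] * n
--     distinct = set()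
--     for i in range(n - 1, -1, -1):
--         distinct.add(input_string[i])
--         suf[i] = len(distinct)
--     seen = set()
--     count = 0
--     res = 0
--     for c, s in zip(input_string, suf):
--         if c in seen:
--             res = max(res, count + s)
--             count = 0
--         count += 1
--         seen.add(c)
--     return res
-- ===== Notes on version B (the rewrite author's own statement) =====
-- stated objective: faster
-- what changed: B precomputes the distinct-character count of every suffix in one backward pass, replacing A's per-repeat construction of set(input_string[idx:]) with an O(1) lookup.
import Mathlib
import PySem

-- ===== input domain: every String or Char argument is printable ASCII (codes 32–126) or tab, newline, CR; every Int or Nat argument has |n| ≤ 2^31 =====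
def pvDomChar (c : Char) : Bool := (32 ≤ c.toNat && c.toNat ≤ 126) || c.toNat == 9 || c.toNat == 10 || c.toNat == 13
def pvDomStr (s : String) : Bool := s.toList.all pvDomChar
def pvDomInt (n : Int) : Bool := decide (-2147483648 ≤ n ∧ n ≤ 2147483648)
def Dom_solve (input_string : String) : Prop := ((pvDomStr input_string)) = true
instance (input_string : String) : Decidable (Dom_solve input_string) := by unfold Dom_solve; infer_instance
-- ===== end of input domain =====

-- B replaces A's per-repeat scan set(s[idx:]) by suffix distinct-counts precomputed
-- in one backward pass (objective: faster, asymptotic).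


-- ===== PORT A =====
-- A's for-loop over enumerate(input_string); state (seen, count, res).
def solveLoopA (full : List Char) : List (Int × Char) → PySem.Set Char → Int → Int → Int
  | [], _, _, res => res
  | (idx, c) :: rest, seen, count, res =>
    if PySem.Set.contains seen c then
      let current := count + ((PySem.Set.ofList (PySem.List.slice full (some idx) none)).length : Int)
      let res' := if current > res then current else res
      solveLoopA full rest (PySem.Set.add seen c) (0 + 1) res'
    else
      solveLoopA full rest (PySem.Set.add seen c) (count + 1) res

def solve (input_string : String) : Int :=
  solveLoopA input_string.toList (PySem.List.enumerate input_string.toList 0) PySem.Set.empty 0 0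

-- ===== PORT B =====
-- Backward pass: suffix distinct sets/counts (B's first loop, right-to-left).
def sufCounts : List Char → PySem.Set Char × List Int
  | [] => (PySem.Set.empty, [])
  | c :: rest =>
    let (st, l) := sufCounts rest
    let st' := PySem.Set.add st c
    (st', (st'.length : Int) :: l)

-- Forward pass over zip(input_string, suf) (B's second loop).
def solveLoopB : List (Char × Int) → PySem.Set Char → Int → Int → Int
  | [], _, _, res => res
  | (c, s) :: rest, seen, count, res =>
    if PySem.Set.contains seen c then
      solveLoopB rest (PySem.Set.add seen c) (0 + 1) (max res (count + s))
    else
      solveLoopB rest (PySem.Set.add seen c) (count + 1) res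

def solve_alt (input_string : String) : Int :=
  solveLoopB (input_string.toList.zip (sufCounts input_string.toList).2) PySem.Set.empty 0 0

-- ===== PRECONDITION & SPEC =====
def Spec_solve (input_string : String) (out : Int) : Prop := out = solve_alt input_string
instance (input_string : String) (out : Int) : Decidable (Spec_solve input_string out) := by unfold Spec_solve; infer_instance

-- ===== CLAIM (what is proved, stated in full; the proofs are below) =====
def Claim_equal_solve : Prop := ∀ (input_string : String), Dom_solve input_string → Spec_solve input_string (solve input_string)

-- ===== LEMMAS AND PROOFS =====

theorem sufCounts_cons (c : Char) (rest : List Char) :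
    sufCounts (c :: rest)
      = (PySem.Set.add (sufCounts rest).1 c,
         ((PySem.Set.add (sufCounts rest).1 c).length : Int) :: (sufCounts rest).2) := rfl

theorem solveLoopA_cons (full : List Char) (idx : Int) (c : Char)
    (rest : List (Int × Char)) (seen : PySem.Set Char) (count res : Int) :
    solveLoopA full ((idx, c) :: rest) seen count res
      = if PySem.Set.contains seen c then
          solveLoopA full rest (PySem.Set.add seen c) (0 + 1)
            (if count + ((PySem.Set.ofList (PySem.List.slice full (some idx) none)).length : Int) > res
             then count + ((PySem.Set.ofList (PySem.List.slice full (some idx) none)).length : Int)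
             else res)
        else solveLoopA full rest (PySem.Set.add seen c) (count + 1) res := rfl

theorem solveLoopB_cons (c : Char) (s : Int) (rest : List (Char × Int))
    (seen : PySem.Set Char) (count res : Int) :
    solveLoopB ((c, s) :: rest) seen count res
      = if PySem.Set.contains seen c then
          solveLoopB rest (PySem.Set.add seen c) (0 + 1) (max res (count + s))
        else solveLoopB rest (PySem.Set.add seen c) (count + 1) res := rfl

theorem sufCounts_fst_nodup (l : List Char) : (sufCounts l).1.Nodup := by
  induction l with
  | nil => simp [sufCounts, PySem.Set.empty]
  | cons c rest ih =>
    rw [sufCounts_cons]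
    exact PySem.Set.nodup_add _ _ ih

theorem mem_sufCounts_fst (l : List Char) (x : Char) : x ∈ (sufCounts l).1 ↔ x ∈ l := by
  induction l with
  | nil => simp [sufCounts, PySem.Set.empty]
  | cons c rest ih =>
    rw [sufCounts_cons]
    simp [PySem.Set.mem_add, ih]
    tauto

theorem length_sufCounts_fst (l : List Char) :
    (sufCounts l).1.length = (PySem.Set.ofList l).length := by
  have hperm : (sufCounts l).1.Perm (PySem.Set.ofList l) := by
    rw [List.perm_ext_iff_of_nodup (sufCounts_fst_nodup l) (PySem.Set.nodup_ofList l)]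
    intro a
    rw [mem_sufCounts_fst, PySem.Set.mem_ofList]
  exact hperm.length_eq

theorem loop_eq (rest : List Char) : ∀ (pref : List Char) (seen : PySem.Set Char)
    (count res : Int),
    solveLoopA (pref ++ rest) (PySem.List.enumerate rest (pref.length : Int)) seen count res
      = solveLoopB (rest.zip (sufCounts rest).2) seen count res := by
  induction rest with
  | nil => intro pref seen count res; simp [PySem.List.enumerate_nil, solveLoopA, solveLoopB, sufCounts]
  | cons c rest' ih =>
    intro pref seen count res
    rw [PySem.List.enumerate_cons, sufCounts_cons, List.zip_cons_cons,
      solveLoopA_cons, solveLoopB_cons]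
    have hdrop : PySem.List.slice (pref ++ c :: rest') (some ((pref.length : Nat) : Int)) none
        = c :: rest' := by
      rw [PySem.List.slice_from_natCast]
      simp
    have hlen : ((PySem.Set.ofList (c :: rest')).length : Int)
        = ((PySem.Set.add (sufCounts rest').1 c).length : Int) := by
      have := length_sufCounts_fst (c :: rest')
      rw [sufCounts_cons] at this
      simp only at this
      omega
    have hshift : ((pref.length : Int) + 1) = (((pref ++ [c]).length : Nat) : Int) := by
      simp
    have happ : pref ++ c :: rest' = (pref ++ [c]) ++ rest' := by simp
    have hres : (if count + ((PySem.Set.ofList (PySem.List.slice (pref ++ c :: rest')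
            (some ((pref.length : Nat) : Int)) none)).length : Int) > res
         then count + ((PySem.Set.ofList (PySem.List.slice (pref ++ c :: rest')
            (some ((pref.length : Nat) : Int)) none)).length : Int)
         else res)
        = max res (count + ((PySem.Set.add (sufCounts rest').1 c).length : Int)) := by
      rw [hdrop, ← hlen, max_def]
      split_ifs <;> omega
    cases hc : PySem.Set.contains seen c with
    | true =>
      rw [if_pos rfl, if_pos rfl, hres, hshift, happ, ih]
    | false =>
      rw [if_neg (by simp), if_neg (by simp), hshift, happ, ih]

-- ===== VERDICT (by name: the statement is the Claim_ definition above) =====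
theorem solve_spec : Claim_equal_solve := by
  intro s _
  unfold Spec_solve solve solve_alt
  have := loop_eq s.toList [] PySem.Set.empty 0 0
  simpa using this
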